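-- pv_equiv track=rewrite | github.com/zubkovoleg01/yandex-algorithm | I.py | choose_days
-- ===== SOURCE A (Python) =====
-- def choose_days(N, year, holidays, first_day_of_year):
--     def is_leap_year(year):
--         return year % 400 == 0 or (year % 4 == 0 and year % 100 != 0)
--
--     def day_of_week(day, month, year):
--         months = {
--             'January': 0, 'February': 31, 'March': 59, 'April': 90, 'May': 120,
--             'June': 151, 'July': 181, 'August': 212, 'September': 243, 'October': 273,
--             'November': 304, 'December': 334
--         }
--         days = ['Monday', 'Tuesday', 'Wednesday', 'Thursday', 'Friday', 'Saturday', 'Sunday']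
--         total_days = day + months[month]
--         if is_leap_year(year) and month in ['February', 'March']:
--             total_days += 1
--         return days[(year - 1 + total_days) % 7]
--
--     work_days = {'Monday': 0, 'Tuesday': 0, 'Wednesday': 0, 'Thursday': 0, 'Friday': 0, 'Saturday': 0, 'Sunday': 0}
--     for day in range(1, 367):
--         current_day = day_of_week(day, 'January', year)
--         if current_day not in work_days:
--             continue
--         if current_day == first_day_of_year:
--             current_day_is_holiday = True
--         else:
--             current_day_is_holiday = False
--         for holiday in holidays:
--             if day == holiday[0] and current_day == day_of_week(holiday[0], holiday[1], year):
--                 current_day_is_holiday = True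
--         if not current_day_is_holiday:
--             work_days[current_day] += 1
--
--     best_day = max(work_days, key=work_days.get)
--     worst_day = min(work_days, key=work_days.get)
--
--     return best_day, worst_day
-- ===== SOURCE B (Python) =====
-- def choose_days(N, year, holidays, first_day_of_year):
--     months = {
--         'January': 0, 'February': 31, 'March': 59, 'April': 90, 'May': 120,
--         'June': 151, 'July': 181, 'August': 212, 'September': 243, 'October': 273,
--         'November': 304, 'December': 334
--     }
--     names = ['Monday', 'Tuesday', 'Wednesday', 'Thursday', 'Friday', 'Saturday', 'Sunday']
--     leap = year % 400 == 0 or (year % 4 == 0 and year % 100 != 0)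
--     # One pass over the holidays: day d is blocked by holiday (d, m) exactly when
--     # the weekday computed for (d, m) equals the weekday of day d of January,
--     # i.e. when the month offset is a multiple of 7.
--     blocked = set()
--     for d, m in holidays:
--         if 1 <= d <= 366:
--             off = months[m] + (1 if leap and m in ('February', 'March') else 0)
--             if off % 7 == 0:
--                 blocked.add(d)
--     # One pass over the days with a flat 7-slot tally indexed by weekday number.
--     counts = [0] * 7
--     for d in range(1, 367):
--         w = (year - 1 + d) % 7
--         if names[w] != first_day_of_year and d not in blocked:
--             counts[w] += 1
--     tally = dict(zip(names, counts))
--     best_day = max(tally, key=tally.get)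
--     worst_day = min(tally, key=tally.get)
--     return best_day, worst_day
-- ===== Notes on version B (the rewrite author's own statement) =====
-- stated objective: faster
-- what changed: B replaces A's nested 366-day x holidays scan (which recomputes day_of_week and compares weekday strings for every day/holiday pair) by one pass over the holidays building a set of blocked day numbers via an arithmetic month-offset-mod-7 test, then one pass over the days with a flat 7-slot integer tally indexed by weekday number, zipped into the Monday..Sunday dict only for the final max/min.
import Mathlib
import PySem

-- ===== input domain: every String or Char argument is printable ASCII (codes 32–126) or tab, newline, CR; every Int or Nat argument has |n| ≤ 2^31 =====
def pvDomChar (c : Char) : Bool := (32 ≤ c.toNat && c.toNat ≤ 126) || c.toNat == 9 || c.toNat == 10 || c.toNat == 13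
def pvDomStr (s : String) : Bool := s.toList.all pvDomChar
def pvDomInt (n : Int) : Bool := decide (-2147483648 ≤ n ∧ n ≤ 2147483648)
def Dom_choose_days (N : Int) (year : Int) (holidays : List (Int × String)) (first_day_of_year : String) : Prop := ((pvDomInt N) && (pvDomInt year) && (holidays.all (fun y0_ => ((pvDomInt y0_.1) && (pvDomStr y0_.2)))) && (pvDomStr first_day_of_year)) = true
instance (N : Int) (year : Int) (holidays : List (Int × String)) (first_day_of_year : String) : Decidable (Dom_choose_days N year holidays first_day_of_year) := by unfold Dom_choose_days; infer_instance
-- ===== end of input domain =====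

-- B builds a blocked-day set in one pass over the holidays (month-offset mod 7 test) and
-- tallies the 366 days once into a flat 7-slot array, instead of A's nested day x holiday
-- string-comparing scan: asymptotically faster in the number of holidays.


-- ===== PORT A =====
def pvMonthsA : PySem.Dict String Int := PySem.Dict.ofList
  [("January", 0), ("February", 31), ("March", 59), ("April", 90), ("May", 120),
   ("June", 151), ("July", 181), ("August", 212), ("September", 243), ("October", 273),
   ("November", 304), ("December", 334)]

def pvDaysA : List String :=
  ["Monday", "Tuesday", "Wednesday", "Thursday", "Friday", "Saturday", "Sunday"]

def pvIsLeapA (year : Int) : Bool :=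
  PySem.Int.mod year 400 == 0 || (PySem.Int.mod year 4 == 0 && PySem.Int.mod year 100 != 0)

-- months[month] raises KeyError for an unknown month name; exactly those inputs are excluded
-- by Pre_choose_days, so the total lookup getD … 0 is exact on the admitted inputs.
-- The list index (year - 1 + total) % 7 always lies in [0, 7), so .getD "" is exact.
def pvDayOfWeekA (day : Int) (month : String) (year : Int) : String :=
  let total := day + PySem.Dict.getD pvMonthsA month 0
  let total := if pvIsLeapA year && (month == "February" || month == "March") then total + 1 else total
  (PySem.List.pyGet? pvDaysA (PySem.Int.mod (year - 1 + total) 7)).getD ""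

-- the body of A's 'for day in range(1, 367)' loop
def pvStepA (year : Int) (holidays : List (Int × String)) (first_day_of_year : String)
    (wd : PySem.Dict String Int) (day : Int) : PySem.Dict String Int :=
  let current := pvDayOfWeekA day "January" year
  if !(PySem.Dict.contains wd current) then wd
  else
    let hol := if current == first_day_of_year then true else false
    let hol := holidays.foldl
      (fun f h => if day == h.1 && current == pvDayOfWeekA h.1 h.2 year then true else f) hol
    if !hol then PySem.Dict.modify wd current 0 (· + 1) else wd

def choose_days (N : Int) (year : Int) (holidays : List (Int × String)) (first_day_of_year : String) : String × String :=
  let work_days : PySem.Dict String Int := PySem.Dict.ofList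
    [("Monday", 0), ("Tuesday", 0), ("Wednesday", 0), ("Thursday", 0), ("Friday", 0),
     ("Saturday", 0), ("Sunday", 0)]
  let work_days := (PySem.List.pyRange 1 367 1).foldl (pvStepA year holidays first_day_of_year) work_days
  -- max/min over a 7-key dict are never empty: .getD "" is exact
  let best_day := (PySem.List.max? (PySem.Dict.keys work_days) (fun k => PySem.Dict.getD work_days k 0)).getD ""
  let worst_day := (PySem.List.min? (PySem.Dict.keys work_days) (fun k => PySem.Dict.getD work_days k 0)).getD ""
  (best_day, worst_day)

-- ===== PORT B =====
def pvMonthsB : PySem.Dict String Int := PySem.Dict.ofList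
  [("January", 0), ("February", 31), ("March", 59), ("April", 90), ("May", 120),
   ("June", 151), ("July", 181), ("August", 212), ("September", 243), ("October", 273),
   ("November", 304), ("December", 334)]

def pvNamesB : List String :=
  ["Monday", "Tuesday", "Wednesday", "Thursday", "Friday", "Saturday", "Sunday"]

def pvIsLeapB (year : Int) : Bool :=
  PySem.Int.mod year 400 == 0 || (PySem.Int.mod year 4 == 0 && PySem.Int.mod year 100 != 0)

-- months[m] raises KeyError for an unknown month name reached with an in-range day, exactly as
-- in A; those inputs are outside Pre_choose_days, so getD … 0 is exact on the admitted inputs.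
def pvOffB (leap : Bool) (h : Int × String) : Int :=
  PySem.Dict.getD pvMonthsB h.2 0 + (if leap && (h.2 == "February" || h.2 == "March") then 1 else 0)

-- the body of B's 'for d, m in holidays' loop
def pvHolStepB (leap : Bool) (s : PySem.Set Int) (h : Int × String) : PySem.Set Int :=
  if 1 ≤ h.1 && h.1 ≤ 366 then
    (if PySem.Int.mod (pvOffB leap h) 7 == 0 then PySem.Set.add s h.1 else s)
  else s

-- the body of B's 'for d in range(1, 367)' loop; 0 ≤ w < 7 so pyGetD/pySetD/.getD "" are exact
def pvStepB (year : Int) (first_day_of_year : String) (blocked : PySem.Set Int)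
    (cs : List Int) (d : Int) : List Int :=
  let w := PySem.Int.mod (year - 1 + d) 7
  if ((PySem.List.pyGet? pvNamesB w).getD "" != first_day_of_year) && !(PySem.Set.contains blocked d)
  then PySem.List.pySetD cs w (PySem.List.pyGetD cs w 0 + 1) else cs

def choose_days_alt (N : Int) (year : Int) (holidays : List (Int × String)) (first_day_of_year : String) : String × String :=
  let leap := pvIsLeapB year
  let blocked : PySem.Set Int := holidays.foldl (pvHolStepB leap) PySem.Set.empty
  let counts : List Int := (PySem.List.pyRange 1 367 1).foldl (pvStepB year first_day_of_year blocked)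
    [0, 0, 0, 0, 0, 0, 0]
  let tally : PySem.Dict String Int := PySem.Dict.ofList (List.zip pvNamesB counts)
  let best_day := (PySem.List.max? (PySem.Dict.keys tally) (fun k => PySem.Dict.getD tally k 0)).getD ""
  let worst_day := (PySem.List.min? (PySem.Dict.keys tally) (fun k => PySem.Dict.getD tally k 0)).getD ""
  (best_day, worst_day)

-- ===== PRECONDITION & SPEC =====
-- Pre_ excludes exactly the inputs on which Python A raises KeyError: a holiday whose day
-- number lies in 1..366 but whose month is not one of the twelve month names.
def Pre_choose_days (N : Int) (year : Int) (holidays : List (Int × String)) (first_day_of_year : String) : Prop :=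
  ∀ h ∈ holidays, (1 ≤ h.1 ∧ h.1 ≤ 366) →
    h.2 ∈ ["January", "February", "March", "April", "May", "June", "July", "August",
           "September", "October", "November", "December"]
instance (N : Int) (year : Int) (holidays : List (Int × String)) (first_day_of_year : String) : Decidable (Pre_choose_days N year holidays first_day_of_year) := by unfold Pre_choose_days; infer_instance

def pvWitness_choose_days : Int × Int × (List (Int × String)) × String :=
  (1, 2024, [(5, "January"), (100, "May"), (400, "Nonmonth")], "Monday")

def Spec_choose_days (N : Int) (year : Int) (holidays : List (Int × String)) (first_day_of_year : String) (out : String × String) : Prop := out = choose_days_alt N year holidays first_day_of_year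
instance (N : Int) (year : Int) (holidays : List (Int × String)) (first_day_of_year : String) (out : String × String) : Decidable (Spec_choose_days N year holidays first_day_of_year out) := by unfold Spec_choose_days; infer_instance

-- ===== CLAIM (what is proved, stated in full; the proofs are below) =====
def Claim_equal_choose_days : Prop := ∀ (N : Int) (year : Int) (holidays : List (Int × String)) (first_day_of_year : String), Dom_choose_days N year holidays first_day_of_year → Pre_choose_days N year holidays first_day_of_year → Spec_choose_days N year holidays first_day_of_year (choose_days N year holidays first_day_of_year)

-- ===== LEMMAS AND PROOFS =====
-- pvName i = the weekday name at index i of the days table (proof helper)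
def pvName (i : Int) : String := (PySem.List.pyGet? pvDaysA i).getD ""

lemma pvName_inj (i j : Int) (hi0 : 0 ≤ i) (hi : i < 7) (hj0 : 0 ≤ j) (hj : j < 7) :
    (pvName i == pvName j) = (i == j) := by
  interval_cases i <;> interval_cases j <;> decide

lemma pvDayOfWeekA_jan (d year : Int) :
    pvDayOfWeekA d "January" year = pvName (PySem.Int.mod (year - 1 + d) 7) := by
  have h1 : PySem.Dict.getD pvMonthsA "January" 0 = 0 := by decide
  simp only [pvDayOfWeekA, h1]
  simp [pvName]

lemma pvDayOfWeekA_off (year : Int) (h : Int × String) :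
    pvDayOfWeekA h.1 h.2 year
      = pvName (PySem.Int.mod (year - 1 + (h.1 + pvOffB (pvIsLeapA year) h)) 7) := by
  simp only [pvDayOfWeekA, pvOffB, pvName]
  have hm : pvMonthsB = pvMonthsA := rfl
  rw [hm]
  split_ifs with hc <;> ring_nf
lemma mem_holFold (leap : Bool) (hs : List (Int × String)) (s : PySem.Set Int) (d : Int) :
    d ∈ hs.foldl (pvHolStepB leap) s ↔
      d ∈ s ∨ ∃ h ∈ hs, h.1 = d ∧ (1 ≤ d ∧ d ≤ 366) ∧ PySem.Int.mod (pvOffB leap h) 7 = 0 := by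
  induction hs generalizing s with
  | nil => simp
  | cons h t ih =>
    simp only [List.foldl_cons, ih, List.mem_cons]
    unfold pvHolStepB
    split_ifs with h1 h2
    · simp only [PySem.Set.mem_add]
      constructor
      · rintro (⟨hx | hx⟩ | hx)
        · exact Or.inl hx
        · subst hx
          simp only [Bool.and_eq_true, decide_eq_true_eq] at h1
          exact Or.inr ⟨h, Or.inl rfl, rfl, h1, by simpa using h2⟩
        · rcases hx with ⟨g, hg, rest⟩; exact Or.inr ⟨g, Or.inr hg, rest⟩
      · rintro (hx | ⟨g, (rfl | hg), rest⟩)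
        · exact Or.inl (Or.inl hx)
        · exact Or.inl (Or.inr rest.1.symm)
        · exact Or.inr ⟨g, hg, rest⟩
    · constructor
      · rintro (hx | ⟨g, hg, rest⟩)
        · exact Or.inl hx
        · exact Or.inr ⟨g, Or.inr hg, rest⟩
      · rintro (hx | ⟨g, (rfl | hg), rest⟩)
        · exact Or.inl hx
        · exact absurd ((PySem.Int.mod_eq_zero_iff_dvd _ _).mp rest.2.2) (by simpa using h2)
        · exact Or.inr ⟨g, hg, rest⟩
    · constructor
      · rintro (hx | ⟨g, hg, rest⟩)
        · exact Or.inl hx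
        · exact Or.inr ⟨g, Or.inr hg, rest⟩
      · rintro (hx | ⟨g, (rfl | hg), rest⟩)
        · exact Or.inl hx
        · simp only [Bool.and_eq_true, decide_eq_true_eq, not_and, not_le] at h1
          have h3 := rest.1; have h4 := rest.2.1; omega
        · exact Or.inr ⟨g, hg, rest⟩
lemma pvCond_iff (year d : Int) (hd1 : 1 ≤ d) (hd2 : d ≤ 366) (h : Int × String) :
    (d == h.1 && (pvName (PySem.Int.mod (year - 1 + d) 7) == pvDayOfWeekA h.1 h.2 year)) = true ↔
      (h.1 = d ∧ (1 ≤ d ∧ d ≤ 366) ∧ PySem.Int.mod (pvOffB (pvIsLeapB year) h) 7 = 0) := by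
  have hleap : pvIsLeapB = pvIsLeapA := rfl
  rw [hleap, pvDayOfWeekA_off]
  have h7 : (0:Int) < 7 := by norm_num
  rw [pvName_inj _ _ (PySem.Int.mod_nonneg _ h7) (PySem.Int.mod_lt _ h7)
      (PySem.Int.mod_nonneg _ h7) (PySem.Int.mod_lt _ h7)]
  simp only [Bool.and_eq_true, beq_iff_eq]
  rw [PySem.Int.mod_eq_emod_of_pos h7, PySem.Int.mod_eq_emod_of_pos h7,
      PySem.Int.mod_eq_emod_of_pos h7]
  constructor
  · rintro ⟨rfl, hmod⟩
    refine ⟨rfl, ⟨hd1, hd2⟩, ?_⟩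
    omega
  · rintro ⟨rfl, _, hmod⟩
    exact ⟨rfl, by omega⟩

lemma any_eq_contains (year : Int) (holidays : List (Int × String)) (d : Int)
    (hd1 : 1 ≤ d) (hd2 : d ≤ 366) :
    (holidays.any (fun h =>
        d == h.1 && (pvName (PySem.Int.mod (year - 1 + d) 7) == pvDayOfWeekA h.1 h.2 year)))
      = PySem.Set.contains (holidays.foldl (pvHolStepB (pvIsLeapB year)) PySem.Set.empty) d := by
  rw [Bool.eq_iff_iff]
  rw [PySem.Set.contains_iff, mem_holFold, List.any_eq_true]
  simp only [PySem.Set.empty, List.not_mem_nil, false_or]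
  constructor
  · rintro ⟨h, hh, hc⟩
    exact ⟨h, hh, (pvCond_iff year d hd1 hd2 h).mp hc⟩
  · rintro ⟨h, hh, hc⟩
    exact ⟨h, hh, (pvCond_iff year d hd1 hd2 h).mpr hc⟩
lemma pv_contains_name (c0 c1 c2 c3 c4 c5 c6 : Int) (w : Int) (h0 : 0 ≤ w) (h7 : w < 7) :
    PySem.Dict.contains (PySem.Dict.ofList (List.zip pvDaysA [c0, c1, c2, c3, c4, c5, c6]))
      (pvName w) = true := by
  interval_cases w <;> rfl

lemma pv_modify_name (c0 c1 c2 c3 c4 c5 c6 : Int) (w : Int) (h0 : 0 ≤ w) (h7 : w < 7) :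
    PySem.Dict.modify (PySem.Dict.ofList (List.zip pvDaysA [c0, c1, c2, c3, c4, c5, c6]))
      (pvName w) 0 (· + 1)
      = PySem.Dict.ofList (List.zip pvDaysA
          (PySem.List.pySetD [c0, c1, c2, c3, c4, c5, c6] w
            (PySem.List.pyGetD [c0, c1, c2, c3, c4, c5, c6] w 0 + 1))) := by
  interval_cases w <;>
    simp [pvName, pvDaysA, PySem.Dict.ofList, PySem.Dict.insert, PySem.Dict.modify,
      PySem.Dict.contains, PySem.Dict.getD, PySem.Dict.get?, PySem.Dict.empty,
      PySem.List.pySetD, PySem.List.pyGetD, PySem.List.pySet?, PySem.List.pyGet?,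
      PySem.List.pyIdx?, PySem.Dict.update, List.foldl]
lemma pv_len7 (cs : List Int) (h : cs.length = 7) :
    ∃ a b c d e f g : Int, cs = [a, b, c, d, e, f, g] := by
  match cs, h with
  | [a, b, c, d, e, f, g], _ => exact ⟨a, b, c, d, e, f, g, rfl⟩

lemma pv_step_rel (year : Int) (holidays : List (Int × String)) (first : String)
    (d : Int) (hd1 : 1 ≤ d) (hd2 : d ≤ 366) (cs : List Int) (hlen : cs.length = 7) :
    pvStepA year holidays first (PySem.Dict.ofList (List.zip pvDaysA cs)) d
        = PySem.Dict.ofList (List.zip pvDaysA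
            (pvStepB year first (holidays.foldl (pvHolStepB (pvIsLeapB year)) PySem.Set.empty) cs d))
      ∧ (pvStepB year first (holidays.foldl (pvHolStepB (pvIsLeapB year)) PySem.Set.empty) cs d).length = 7 := by
  obtain ⟨c0, c1, c2, c3, c4, c5, c6, rfl⟩ := pv_len7 cs hlen
  have h7 : (0:Int) < 7 := by norm_num
  have hnm : ∀ i : Int, (PySem.List.pyGet? pvNamesB i).getD "" = pvName i := fun _ => rfl
  simp only [pvStepA, pvStepB, pvDayOfWeekA_jan, hnm]
  set w := PySem.Int.mod (year - 1 + d) 7 with hw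
  have hw0 : 0 ≤ w := PySem.Int.mod_nonneg _ h7
  have hw7 : w < 7 := PySem.Int.mod_lt _ h7
  have hany := any_eq_contains year holidays d hd1 hd2
  rw [← hw] at hany
  rw [pv_contains_name c0 c1 c2 c3 c4 c5 c6 w hw0 hw7,
      PySem.List.foldl_if_true_eq, hany]
  simp only [Bool.not_true, Bool.false_eq_true, if_false, bne]
  by_cases hfirst : (pvName w == first) = true
  · simp only [hfirst, if_true, Bool.true_or, Bool.not_true, Bool.false_and, Bool.false_eq_true,
      if_false]
    exact ⟨trivial, by simp⟩
  · rw [Bool.not_eq_true] at hfirst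
    simp only [hfirst, if_false, Bool.false_or, Bool.not_false, Bool.true_and,
      Bool.false_eq_true]
    by_cases hbl : PySem.Set.contains (holidays.foldl (pvHolStepB (pvIsLeapB year)) PySem.Set.empty) d = true
    · simp only [hbl, Bool.not_true, Bool.false_eq_true, if_false]
      exact ⟨trivial, by simp⟩
    · rw [Bool.not_eq_true] at hbl
      simp only [hbl, Bool.not_false, if_true]
      refine ⟨pv_modify_name c0 c1 c2 c3 c4 c5 c6 w hw0 hw7, ?_⟩
      rw [PySem.List.length_pySetD]
      omega
lemma pv_fold_rel (year : Int) (holidays : List (Int × String)) (first : String)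
    (ds : List Int) (hds : ∀ d ∈ ds, 1 ≤ d ∧ d ≤ 366) :
    ∀ cs : List Int, cs.length = 7 →
      ds.foldl (pvStepA year holidays first) (PySem.Dict.ofList (List.zip pvDaysA cs))
        = PySem.Dict.ofList (List.zip pvDaysA
            (ds.foldl (pvStepB year first (holidays.foldl (pvHolStepB (pvIsLeapB year)) PySem.Set.empty)) cs)) := by
  induction ds with
  | nil => intro cs _; rfl
  | cons d t ih =>
    intro cs hlen
    have hd := hds d (List.mem_cons_self)
    obtain ⟨heq, hlen'⟩ := pv_step_rel year holidays first d hd.1 hd.2 cs hlen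
    simp only [List.foldl_cons, heq]
    exact ih (fun x hx => hds x (List.mem_cons_of_mem _ hx)) _ hlen'

lemma pv_main (N : Int) (year : Int) (holidays : List (Int × String)) (first : String) :
    choose_days N year holidays first = choose_days_alt N year holidays first := by
  simp only [choose_days, choose_days_alt]
  have hinit : (PySem.Dict.ofList
      [("Monday", (0:Int)), ("Tuesday", 0), ("Wednesday", 0), ("Thursday", 0), ("Friday", 0),
       ("Saturday", 0), ("Sunday", 0)])
      = PySem.Dict.ofList (List.zip pvDaysA [0, 0, 0, 0, 0, 0, 0]) := rfl
  rw [hinit, pv_fold_rel year holidays first _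
      (fun d hd => by
        rw [PySem.List.mem_pyRange_one] at hd
        omega)
      [0, 0, 0, 0, 0, 0, 0] rfl]
  rfl

-- ===== VERDICT (by name: the statement is the Claim_ definition above) =====
theorem choose_days_spec : Claim_equal_choose_days := by
  intro N year holidays first_day_of_year _ _
  unfold Spec_choose_days
  exact pv_main N year holidays first_day_of_year
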